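-- pv_equiv track=rewrite | github.com/akapug/elide-showcases | original/showcases/live-music-generator/python/ml_composer.py | _generate_bass
-- ===== SOURCE A (Python) =====
-- from typing import List, Dict, Optional, Tuple
--
-- def _generate_bass(harmonization: List[List[int]]) -> List[int]:
--     """Generate bass line from harmonization"""
--
--     bass = []
--
--     for chord in harmonization:
--         # Use root of chord (lowest note)
--         root = min(chord)
--
--         # Transpose to bass register
--         while root > 55:  # Below G2
--             root -= 12
--
--         bass.append(root)
--
--     return bass
-- ===== SOURCE B (Python) =====
-- from typing import List
--
-- def _generate_bass(harmonization: List[List[int]]) -> List[int]: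
--     """Generate bass line from harmonization (closed-form register reduction)."""
--     return [
--         root - 12 * ((root - 44) // 12) if root > 55 else root
--         for root in map(min, harmonization)
--     ]
-- ===== Notes on version B (the rewrite author's own statement) =====
-- stated objective: simpler
-- what changed: Replaces the per-chord 'while root > 55: root -= 12' loop with a single closed-form modular reduction (subtract 12*((root-44)//12) when root > 55) and the accumulator loop with a comprehension over map(min, ...).
import Mathlib
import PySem

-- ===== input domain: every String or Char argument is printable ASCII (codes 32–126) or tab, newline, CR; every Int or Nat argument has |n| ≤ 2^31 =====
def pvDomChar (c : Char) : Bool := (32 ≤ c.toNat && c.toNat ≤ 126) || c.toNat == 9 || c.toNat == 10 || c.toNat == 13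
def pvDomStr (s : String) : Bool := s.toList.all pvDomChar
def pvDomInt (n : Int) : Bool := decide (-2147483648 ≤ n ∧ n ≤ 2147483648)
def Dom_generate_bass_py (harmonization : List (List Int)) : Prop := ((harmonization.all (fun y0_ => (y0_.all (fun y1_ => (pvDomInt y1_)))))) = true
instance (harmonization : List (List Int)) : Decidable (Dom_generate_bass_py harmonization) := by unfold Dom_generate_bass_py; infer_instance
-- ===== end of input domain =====

-- B replaces A's per-chord subtract-12 while loop by one closed-form modular reduction (simpler, constant work per chord).

-- ===== PORT A =====
-- the 'while root > 55: root -= 12' loop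
def pvReduceRoot (root : Int) : Int :=
  if root > 55 then pvReduceRoot (root - 12) else root
termination_by (root - 55).toNat
decreasing_by omega

def generate_bass_py (harmonization : List (List Int)) : List Int :=
  harmonization.foldl
    (fun bass chord => bass ++ [pvReduceRoot ((PySem.List.min? chord (fun x => x)).getD 0)])
    []

-- ===== PORT B =====
def generate_bass_py_alt (harmonization : List (List Int)) : List Int :=
  harmonization.map (fun chord =>
    let root := (PySem.List.min? chord (fun x => x)).getD 0
    if root > 55 then root - 12 * PySem.Int.floordiv (root - 44) 12 else root)

-- ===== PRECONDITION & SPEC =====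
-- Pre_ excludes inputs containing an empty chord, on which Python's min of an empty sequence raises ValueError in both A and B.
def Pre_generate_bass_py (harmonization : List (List Int)) : Prop :=
  ∀ chord ∈ harmonization, chord ≠ []
instance (harmonization : List (List Int)) : Decidable (Pre_generate_bass_py harmonization) := by unfold Pre_generate_bass_py; infer_instance

def pvWitness_generate_bass_py : List (List Int) := [[60, 64, 67], [55], [100, 90]]

def Spec_generate_bass_py (harmonization : List (List Int)) (out : List Int) : Prop := out = generate_bass_py_alt harmonization
instance (harmonization : List (List Int)) (out : List Int) : Decidable (Spec_generate_bass_py harmonization out) := by unfold Spec_generate_bass_py; infer_instance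

-- ===== CLAIM (what is proved, stated in full; the proofs are below) =====
def Claim_equal_generate_bass_py : Prop := ∀ (harmonization : List (List Int)), Dom_generate_bass_py harmonization → Pre_generate_bass_py harmonization → Spec_generate_bass_py harmonization (generate_bass_py harmonization)

-- ===== LEMMAS AND PROOFS =====
-- The while loop equals the closed-form modular reduction.
theorem pvReduceRoot_closed (r : Int) :
    pvReduceRoot r = if r > 55 then r - 12 * PySem.Int.floordiv (r - 44) 12 else r := by
  fun_induction pvReduceRoot r with
  | case1 r h ih =>
    rw [ih]
    rw [if_pos h]
    by_cases h2 : r - 12 > 55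
    · rw [if_pos h2]
      rw [PySem.Int.floordiv_eq_ediv_of_pos (by norm_num),
          PySem.Int.floordiv_eq_ediv_of_pos (by norm_num)]
      omega
    · rw [if_neg h2]
      rw [PySem.Int.floordiv_eq_ediv_of_pos (by norm_num)]
      omega
  | case2 r h => rw [if_neg h]

-- ===== VERDICT (by name: the statement is the Claim_ definition above) =====
theorem generate_bass_py_spec : Claim_equal_generate_bass_py := by
  intro harmonization _ _
  unfold Spec_generate_bass_py generate_bass_py generate_bass_py_alt
  rw [PySem.List.foldl_append_singleton_eq_map]
  simp only [List.nil_append]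
  exact List.map_congr_left (fun chord _ => pvReduceRoot_closed _)
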